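-- pv_equiv track=rewrite | github.com/DeniAliko/Cryptography | deniLib.py | ITA2Encode
-- ===== SOURCE A (Python) =====
-- def ITA2Encode(text, returnWithSpaces = False):
--     '''Encodes a text into binary using the ITA2 Mapping'''
--     text = text.lower()
--     ITA2_ltr = {"e":1, "\n":2, "a":3, " ":4, "s":5, "i":6, "u":7, "d":9, "r":10, "j":11, \
--             "n":12, "f":13, "c":14, "k":15, "t":16, "z":17, "l":18, "w":19, "h":20, \
--             "y":21, "p":22, "q":23, "o":24, "b":25, "g":26, "m":28, "x":29, "v":30}
--     ITA2_fig = {"@":0, "3":1, "-":3, "'":5, "8":6, "7":7, "4":10, \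
--                 ",":12, "!":13, ":":14, "(":15, "5":16, "+":17, ")":18, "2":19, "$":20, \
--                 "6":21, "0":22, "1":23, "9":24, "?":25, "&":26, ".":28, "/":29, ";":30}
--     LTRS = 31
--     FIGS = 27
--     output = ""
--     letter = True
--
--     if text[0] in ITA2_ltr.keys():
--         output += format(LTRS, 'b')
--         letter = True
--         output += " "
--     elif text[0] in ITA2_fig.keys():
--         output += format(FIGS, 'b')
--         letter = False
--         output += " "
--
--     for char in text:
--         if char in ITA2_ltr.keys() and not letter:
--             output += format(LTRS, 'b')
--             letter = True
--             output += " "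
--         elif char in ITA2_fig.keys() and letter:
--             output += format(FIGS, 'b')
--             letter = False
--             output += " "
--
--         if letter:
--             output += format(ITA2_ltr[char], 'b')
--         if not letter:
--             output += format(ITA2_fig[char], 'b')
--
--         output += " "
--
--     leadingZeroOutput = ""
--     cacheString = ""
--     for i in range(0, len(output)):
--         if output[i] != " ":
--             cacheString += output[i]
--         if output[i] == " ":
--             if len(cacheString) != 5:
--                 cacheString = "0" * (5 - len(cacheString)) + cacheString
--
--             leadingZeroOutput += cacheString
--             if returnWithSpaces:
--                 leadingZeroOutput += " "
--             cacheString = ""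
--
--     return leadingZeroOutput
-- ===== SOURCE B (Python) =====
-- def ITA2Encode(text, returnWithSpaces = False):
--     '''Encodes a text into binary using the ITA2 Mapping'''
--     ITA2_ltr = {"e":1, "\n":2, "a":3, " ":4, "s":5, "i":6, "u":7, "d":9, "r":10, "j":11, \
--             "n":12, "f":13, "c":14, "k":15, "t":16, "z":17, "l":18, "w":19, "h":20, \
--             "y":21, "p":22, "q":23, "o":24, "b":25, "g":26, "m":28, "x":29, "v":30}
--     ITA2_fig = {"@":0, "3":1, "-":3, "'":5, "8":6, "7":7, "4":10, \
--                 ",":12, "!":13, ":":14, "(":15, "5":16, "+":17, ")":18, "2":19, "$":20, \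
--                 "6":21, "0":22, "1":23, "9":24, "?":25, "&":26, ".":28, "/":29, ";":30}
--     LTRS = 31
--     FIGS = 27
--     # one combined table: char -> (is_letter, code)
--     M = {**{c: (True, v) for c, v in ITA2_ltr.items()},
--          **{c: (False, v) for c, v in ITA2_fig.items()}}
--     sep = ' ' if returnWithSpaces else ''
--     codes = []
--     shift = None          # current shift state; None = not primed yet
--     for ch in text.lower():
--         kind, code = M[ch]
--         if kind != shift:
--             codes.append(LTRS if kind else FIGS)
--             shift = kind
--         codes.append(code)
--     return ''.join(format(c, '05b') + sep for c in codes)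
-- ===== Notes on version B (the rewrite author's own statement) =====
-- stated objective: simpler
-- what changed: B replaces A's two sequential passes (emit variable-width binary with space separators, then rescan that whole string to regroup and zero-pad each group to five bits) by one pass that looks each char up in a single combined char->(kind,code) table, tracks the shift state explicitly (None/letter/figure) while collecting the numeric codes, and joins them directly as fixed-width five-bit groups.
-- crash fix: On empty text A raises IndexError (it reads text[0] to prime the shift); B's loop simply runs zero times and returns ''. — e.g. on ITA2Encode("", false): A raises IndexError, B returns ""
import Mathlib
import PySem

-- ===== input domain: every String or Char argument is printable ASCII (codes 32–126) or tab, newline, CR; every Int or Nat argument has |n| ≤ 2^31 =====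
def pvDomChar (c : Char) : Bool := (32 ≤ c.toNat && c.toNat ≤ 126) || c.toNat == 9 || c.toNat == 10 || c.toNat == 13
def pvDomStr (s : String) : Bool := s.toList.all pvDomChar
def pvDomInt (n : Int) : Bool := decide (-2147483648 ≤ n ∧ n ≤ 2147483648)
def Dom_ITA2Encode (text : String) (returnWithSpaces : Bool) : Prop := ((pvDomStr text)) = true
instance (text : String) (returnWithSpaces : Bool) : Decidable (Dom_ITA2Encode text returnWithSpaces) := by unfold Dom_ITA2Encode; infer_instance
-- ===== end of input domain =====

-- B re-implements A's two passes (variable-width binary + space separators, then a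
-- regroup-and-pad rescan) as ONE pass over a combined char->(kind,code) table with an
-- explicit shift state, joined directly as fixed-width 5-bit groups (objective: simpler).

-- shared literal tables (the Python dict literals)
def ita2LtrPairs : List (Char × Int) :=
  [('e',1), ('\n',2), ('a',3), (' ',4), ('s',5), ('i',6), ('u',7), ('d',9), ('r',10), ('j',11),
   ('n',12), ('f',13), ('c',14), ('k',15), ('t',16), ('z',17), ('l',18), ('w',19), ('h',20),
   ('y',21), ('p',22), ('q',23), ('o',24), ('b',25), ('g',26), ('m',28), ('x',29), ('v',30)]
def ita2FigPairs : List (Char × Int) :=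
  [('@',0), ('3',1), ('-',3), ('\'',5), ('8',6), ('7',7), ('4',10),
   (',',12), ('!',13), (':',14), ('(',15), ('5',16), ('+',17), (')',18), ('2',19), ('$',20),
   ('6',21), ('0',22), ('1',23), ('9',24), ('?',25), ('&',26), ('.',28), ('/',29), (';',30)]

-- ===== PORT A =====
def ita2Ltr : PySem.Dict Char Int := PySem.Dict.mk ita2LtrPairs
def ita2Fig : PySem.Dict Char Int := PySem.Dict.mk ita2FigPairs

-- step of A's first loop; format(n,'b') is PySem.Int.toBinChars.
-- ita2Ltr.getD ch 0 / ita2Fig.getD ch 0: Python raises KeyError for an absent key; Pre_ excludes those inputs.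
def pvAStep (st : List Char × Bool) (ch : Char) : List Char × Bool :=
  let st :=
    if ita2Ltr.contains ch && !st.2 then (st.1 ++ PySem.Int.toBinChars 31 ++ [' '], true)
    else if ita2Fig.contains ch && st.2 then (st.1 ++ PySem.Int.toBinChars 27 ++ [' '], false)
    else st
  let o := if st.2 then st.1 ++ PySem.Int.toBinChars (ita2Ltr.getD ch 0) else st.1
  let o := if !st.2 then o ++ PySem.Int.toBinChars (ita2Fig.getD ch 0) else o
  (o ++ [' '], st.2)

-- step of A's second loop (the regroup-and-pad pass over 'output', char by char)
def pvAPad (returnWithSpaces : Bool) (st : List Char × List Char) (ch : Char) : List Char × List Char :=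
  if ch ≠ ' ' then (st.1, st.2 ++ [ch])
  else
    let cache := if st.2.length ≠ 5 then List.replicate (5 - st.2.length) '0' ++ st.2 else st.2
    (st.1 ++ cache ++ (if returnWithSpaces then [' '] else []), [])

def ITA2Encode (text : String) (returnWithSpaces : Bool) : String :=
  let cs := (PySem.Str.lower text).toList
  let init : List Char × Bool :=
    match cs.head? with
    | none => ([], true)   -- Python: text[0] raises IndexError on empty text; Pre_ excludes it
    | some c0 =>
      if ita2Ltr.contains c0 then (PySem.Int.toBinChars 31 ++ [' '], true)
      else if ita2Fig.contains c0 then (PySem.Int.toBinChars 27 ++ [' '], false)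
      else ([], true)
  let output := (cs.foldl pvAStep init).1
  -- for i in range(0, len(output)): reads output[i] left to right
  String.ofList (output.foldl (pvAPad returnWithSpaces) ([], [])).1

-- ===== PORT B =====
-- the merged dict M = {**{c:(True,v)…}, **{c:(False,v)…}} (disjoint keys: plain append)
def ita2Map : PySem.Dict Char (Bool × Int) :=
  PySem.Dict.mk (ita2LtrPairs.map (fun p => (p.1, (true, p.2)))
              ++ ita2FigPairs.map (fun p => (p.1, (false, p.2))))

-- format(c, '05b') for the nonnegative codes used here: zero-pad the binary digits to width 5
def pvPad5 (n : Int) : List Char :=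
  List.replicate (5 - (PySem.Int.toBinChars n).length) '0' ++ PySem.Int.toBinChars n

def pvBStep (st : List Int × Option Bool) (ch : Char) : List Int × Option Bool :=
  match ita2Map.get? ch with
  | none => st   -- Python: M[ch] raises KeyError; Pre_ excludes those inputs
  | some (kind, code) =>
    let st := if some kind ≠ st.2 then (st.1 ++ [if kind then (31:Int) else 27], some kind) else st
    (st.1 ++ [code], st.2)

def ITA2Encode_alt (text : String) (returnWithSpaces : Bool) : String :=
  let sep : List Char := if returnWithSpaces then [' '] else []
  let codes := ((PySem.Str.lower text).toList.foldl pvBStep ([], none)).1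
  String.ofList (codes.map (fun c => pvPad5 c ++ sep)).flatten

-- ===== PRECONDITION & SPEC =====
-- Pre_ is exactly A's return domain: A raises IndexError on "" and KeyError on any
-- character (after lowercasing) outside both ITA2 tables.
def Pre_ITA2Encode (text : String) (returnWithSpaces : Bool) : Prop :=
  text ≠ "" ∧ (PySem.Str.lower text).toList.all
    (fun c => ita2Ltr.contains c || ita2Fig.contains c) = true
instance (text : String) (returnWithSpaces : Bool) : Decidable (Pre_ITA2Encode text returnWithSpaces) := by unfold Pre_ITA2Encode; infer_instance
def pvWitness_ITA2Encode : String × Bool := ("Hi 5!", true)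

-- On empty text A raises IndexError (it reads text[0] to prime the shift); B's loop runs zero times and returns "".
def Raises_ITA2Encode (text : String) (returnWithSpaces : Bool) : Prop := text = ""
instance (text : String) (returnWithSpaces : Bool) : Decidable (Raises_ITA2Encode text returnWithSpaces) := by unfold Raises_ITA2Encode; infer_instance
def pvRaiseWitness_ITA2Encode : String × Bool := ("", false)
def pvRaiseWitnessOut_ITA2Encode : String := ""

def Spec_ITA2Encode (text : String) (returnWithSpaces : Bool) (out : String) : Prop := out = ITA2Encode_alt text returnWithSpaces
instance (text : String) (returnWithSpaces : Bool) (out : String) : Decidable (Spec_ITA2Encode text returnWithSpaces out) := by unfold Spec_ITA2Encode; infer_instance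

-- ===== CLAIM (what is proved, stated in full; the proofs are below) =====
def Claim_equal_ITA2Encode : Prop := ∀ (text : String) (returnWithSpaces : Bool), Dom_ITA2Encode text returnWithSpaces → Pre_ITA2Encode text returnWithSpaces → Spec_ITA2Encode text returnWithSpaces (ITA2Encode text returnWithSpaces)
def Claim_raises_ITA2Encode : Prop := (∀ (text : String) (returnWithSpaces : Bool), Dom_ITA2Encode text returnWithSpaces → Raises_ITA2Encode text returnWithSpaces → ¬ Pre_ITA2Encode text returnWithSpaces) ∧ (Dom_ITA2Encode (pvRaiseWitness_ITA2Encode.1) (pvRaiseWitness_ITA2Encode.2) ∧ Raises_ITA2Encode (pvRaiseWitness_ITA2Encode.1) (pvRaiseWitness_ITA2Encode.2) ∧ ITA2Encode_alt (pvRaiseWitness_ITA2Encode.1) (pvRaiseWitness_ITA2Encode.2) = pvRaiseWitnessOut_ITA2Encode)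

-- ===== LEMMAS AND PROOFS =====

-- proof-side code stream: the ITA2 code numbers both programs emit, given the current shift
def pvCollect : Bool → List Char → List Int
  | _, [] => []
  | b, c :: rest =>
    match ita2Ltr.get? c with
    | some v => (if b then [] else [(31:Int)]) ++ v :: pvCollect true rest
    | none =>
      match ita2Fig.get? c with
      | some v => (if b then [(27:Int)] else []) ++ v :: pvCollect false rest
      | none => pvCollect b rest

theorem mem_keys_of_get?_ltr {c : Char} {v : Int} (h : ita2Ltr.get? c = some v) :
    c ∈ ita2Ltr.keys := by
  by_contra hmem
  rw [(PySem.Dict.get?_eq_none_iff_not_mem_keys _ _).mpr hmem] at h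
  simp at h

theorem mem_keys_of_get?_fig {c : Char} {v : Int} (h : ita2Fig.get? c = some v) :
    c ∈ ita2Fig.keys := by
  by_contra hmem
  rw [(PySem.Dict.get?_eq_none_iff_not_mem_keys _ _).mpr hmem] at h
  simp at h

-- the two key-set facts, evaluated once by the kernel over the literal tables
theorem ltr_keys_fact_b : ita2Ltr.keys.all (fun c =>
    (ita2Fig.get? c == none)
      && (ita2Map.get? c == (ita2Ltr.get? c).map (fun v => (true, v)))) = true := rfl

theorem fig_keys_fact_b : ita2Fig.keys.all (fun c =>
    ita2Map.get? c == (ita2Fig.get? c).map (fun v => (false, v))) = true := rfl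

theorem ita2_disjoint {c : Char} {v : Int} (h : ita2Ltr.get? c = some v) :
    ita2Fig.get? c = none := by
  have hb := List.all_eq_true.mp ltr_keys_fact_b c (mem_keys_of_get?_ltr h)
  simp only [Bool.and_eq_true, beq_iff_eq] at hb
  exact hb.1

theorem ita2Map_ltr {c : Char} {v : Int} (h : ita2Ltr.get? c = some v) :
    ita2Map.get? c = some (true, v) := by
  have hb := List.all_eq_true.mp ltr_keys_fact_b c (mem_keys_of_get?_ltr h)
  simp only [Bool.and_eq_true, beq_iff_eq] at hb
  rw [hb.2, h]; rfl

theorem ita2Map_fig {c : Char} {v : Int} (h : ita2Fig.get? c = some v) :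
    ita2Map.get? c = some (false, v) := by
  have hb := List.all_eq_true.mp fig_keys_fact_b c (mem_keys_of_get?_fig h)
  simp only [beq_iff_eq] at hb
  rw [hb, h]; rfl

-- every emitted code's binary digits are nonempty and space-free
theorem pvCollect_ok (l : List Char) : ∀ b, ∀ v ∈ pvCollect b l,
    PySem.Int.toBinChars v ≠ [] ∧ ' ' ∉ PySem.Int.toBinChars v := by
  have hvals : ∀ w ∈ (ita2LtrPairs.map Prod.snd ++ ita2FigPairs.map Prod.snd) ++ [(31:Int), 27],
      PySem.Int.toBinChars w ≠ [] ∧ ' ' ∉ PySem.Int.toBinChars w := by decide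
  induction l with
  | nil => intro b v hv; simp [pvCollect] at hv
  | cons c rest ih =>
    intro b v hv
    rcases hl : ita2Ltr.get? c with _ | w
    · rcases hf : ita2Fig.get? c with _ | w
      · simp only [pvCollect, hl, hf] at hv
        exact ih b v hv
      · have hw : w ∈ ita2FigPairs.map Prod.snd :=
          List.mem_map_of_mem (PySem.Dict.mem_items_of_get?_eq_some _ hf)
        simp only [pvCollect, hl, hf] at hv
        cases b with
        | false =>
          simp at hv
          rcases hv with hv | hv
          · exact hv ▸ hvals w (by simp [hw])
          · exact ih false v hv
        | true =>
          simp at hv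
          rcases hv with hv | hv | hv
          · exact hv ▸ hvals 27 (by simp)
          · exact hv ▸ hvals w (by simp [hw])
          · exact ih false v hv
    · have hw : w ∈ ita2LtrPairs.map Prod.snd :=
        List.mem_map_of_mem (PySem.Dict.mem_items_of_get?_eq_some _ hl)
      simp only [pvCollect, hl] at hv
      cases b with
      | false =>
        simp at hv
        rcases hv with hv | hv | hv
        · exact hv ▸ hvals 31 (by simp)
        · exact hv ▸ hvals w (by simp [hw])
        · exact ih true v hv
      | true =>
        simp at hv
        rcases hv with hv | hv
        · exact hv ▸ hvals w (by simp [hw])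
        · exact ih true v hv

-- A's first loop produces exactly the blocks "binary ++ space" of the code stream
theorem pvAStep_run (l : List Char) : ∀ (out : List Char) (b : Bool),
    (∀ c ∈ l, (ita2Ltr.contains c || ita2Fig.contains c) = true) →
    (l.foldl pvAStep (out, b)).1
      = out ++ ((pvCollect b l).map (fun v => PySem.Int.toBinChars v ++ [' '])).flatten := by
  induction l with
  | nil => intro out b _; simp [pvCollect]
  | cons c rest ih =>
    intro out b hall
    have hc := hall c (by simp)
    have hrest : ∀ x ∈ rest, (ita2Ltr.contains x || ita2Fig.contains x) = true :=
      fun x hx => hall x (by simp [hx])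
    rw [List.foldl_cons]
    rcases hl : ita2Ltr.get? c with _ | w
    · rcases hf : ita2Fig.get? c with _ | w
      · exfalso
        rw [PySem.Dict.contains_eq_isSome_get?, PySem.Dict.contains_eq_isSome_get?, hl, hf] at hc
        simp at hc
      · have hstep : pvAStep (out, b) c
            = (out ++ (((if b then [(27:Int)] else []) ++ [w]).map
                (fun v => PySem.Int.toBinChars v ++ [' '])).flatten, false) := by
          simp only [pvAStep, PySem.Dict.contains_eq_isSome_get?, hl, hf,
            PySem.Dict.getD_eq_get?_getD]
          rcases b <;> simp
        rw [hstep, ih _ false hrest]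
        simp only [pvCollect, hl, hf]
        rcases b <;> simp
    · have hf := ita2_disjoint hl
      have hstep : pvAStep (out, b) c
          = (out ++ (((if b then [] else [(31:Int)]) ++ [w]).map
              (fun v => PySem.Int.toBinChars v ++ [' '])).flatten, true) := by
        simp only [pvAStep, PySem.Dict.contains_eq_isSome_get?, hl, hf,
          PySem.Dict.getD_eq_get?_getD]
        rcases b <;> simp
      rw [hstep, ih _ true hrest]
      simp only [pvCollect, hl]
      rcases b <;> simp

-- B's loop, once primed, collects exactly the code stream
theorem pvBStep_run (l : List Char) : ∀ (codes : List Int) (b : Bool),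
    (∀ c ∈ l, (ita2Ltr.contains c || ita2Fig.contains c) = true) →
    (l.foldl pvBStep (codes, some b)).1 = codes ++ pvCollect b l := by
  induction l with
  | nil => intro codes b _; simp [pvCollect]
  | cons c rest ih =>
    intro codes b hall
    have hc := hall c (by simp)
    have hrest : ∀ x ∈ rest, (ita2Ltr.contains x || ita2Fig.contains x) = true :=
      fun x hx => hall x (by simp [hx])
    rw [List.foldl_cons]
    rcases hl : ita2Ltr.get? c with _ | w
    · rcases hf : ita2Fig.get? c with _ | w
      · exfalso
        rw [PySem.Dict.contains_eq_isSome_get?, PySem.Dict.contains_eq_isSome_get?, hl, hf] at hc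
        simp at hc
      · have hstep : pvBStep (codes, some b) c
            = (codes ++ ((if b then [(27:Int)] else []) ++ [w]), some false) := by
          simp only [pvBStep, ita2Map_fig hf]
          rcases b <;> simp
        rw [hstep, ih _ false hrest]
        simp only [pvCollect, hl, hf]
        rcases b <;> simp
    · have hstep : pvBStep (codes, some b) c
          = (codes ++ ((if b then [] else [(31:Int)]) ++ [w]), some true) := by
        simp only [pvBStep, ita2Map_ltr hl]
        rcases b <;> simp
      rw [hstep, ih _ true hrest]
      simp only [pvCollect, hl]
      rcases b <;> simp

-- A's second loop: a space-free run just accumulates into the cache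
theorem pvAPad_nospace (sp : Bool) (s : List Char) : ∀ (lead cache : List Char), ' ' ∉ s →
    s.foldl (pvAPad sp) (lead, cache) = (lead, cache ++ s) := by
  induction s with
  | nil => intro lead cache _; simp
  | cons c rest ih =>
    intro lead cache hs
    have hc : c ≠ ' ' := fun h => hs (h ▸ List.mem_cons_self ..)
    rw [List.foldl_cons]
    have hstep : pvAPad sp (lead, cache) c = (lead, cache ++ [c]) := by simp [pvAPad, hc]
    rw [hstep, ih _ _ (fun h => hs (List.mem_cons_of_mem _ h))]
    simp

-- A's conditional pad of a group equals B's format '05b'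
theorem pvPad_eq (v : Int) :
    (if (PySem.Int.toBinChars v).length ≠ 5
     then List.replicate (5 - (PySem.Int.toBinChars v).length) '0' ++ PySem.Int.toBinChars v
     else PySem.Int.toBinChars v) = pvPad5 v := by
  unfold pvPad5
  split_ifs with h
  · rfl
  · rw [not_ne_iff.mp h]; simp

-- A's second loop over the block stream yields B's joined fixed-width groups
theorem pvAPad_run (sp : Bool) (codes : List Int) : ∀ (lead : List Char),
    (∀ v ∈ codes, PySem.Int.toBinChars v ≠ [] ∧ ' ' ∉ PySem.Int.toBinChars v) →
    ((codes.map (fun v => PySem.Int.toBinChars v ++ [' '])).flatten.foldl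
        (pvAPad sp) (lead, [])).1
      = lead ++ (codes.map (fun v => pvPad5 v ++ (if sp then [' '] else []))).flatten := by
  induction codes with
  | nil => intro lead _; simp
  | cons v rest ih =>
    intro lead hall
    have hv := hall v (by simp)
    rw [List.map_cons, List.flatten_cons, List.append_assoc, List.foldl_append]
    rw [pvAPad_nospace sp _ _ _ hv.2, List.singleton_append, List.foldl_cons]
    have hstep : pvAPad sp ((lead, [] ++ PySem.Int.toBinChars v) : List Char × List Char) ' '
        = (lead ++ pvPad5 v ++ (if sp then [' '] else []), []) := by
      simp only [pvAPad, List.nil_append, if_neg (by simp : ¬(' ' ≠ ' '))]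
      rw [pvPad_eq v]
    rw [hstep, ih _ (fun w hw => hall w (by simp [hw]))]
    simp

-- ===== VERDICT (by name: the statement is the Claim_ definition above) =====
theorem ITA2Encode_spec : Claim_equal_ITA2Encode := by
  intro text sp _ hpre
  rcases hpre with ⟨hne, hallb⟩
  have hall : ∀ c ∈ (PySem.Str.lower text).toList,
      (ita2Ltr.contains c || ita2Fig.contains c) = true := by
    intro c hc; exact List.all_eq_true.mp hallb c hc
  unfold Spec_ITA2Encode ITA2Encode ITA2Encode_alt
  rcases hcs : (PySem.Str.lower text).toList with _ | ⟨c0, rest⟩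
  · exfalso
    apply hne
    have hlen := congrArg List.length hcs
    simpa [PySem.Chars.lower] using hlen
  · rw [hcs] at hall
    have hc0 := hall c0 (by simp)
    have hrest : ∀ x ∈ rest, (ita2Ltr.contains x || ita2Fig.contains x) = true :=
      fun x hx => hall x (by simp [hx])
    simp only [List.head?_cons]
    rcases hl : ita2Ltr.get? c0 with _ | w
    · rcases hf : ita2Fig.get? c0 with _ | w
      · exfalso
        rw [PySem.Dict.contains_eq_isSome_get?, PySem.Dict.contains_eq_isSome_get?, hl, hf] at hc0
        simp at hc0
      · -- first char is a figure: both sides start in figure shift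
        have hcontains : ita2Ltr.contains c0 = false ∧ ita2Fig.contains c0 = true := by
          rw [PySem.Dict.contains_eq_isSome_get?, PySem.Dict.contains_eq_isSome_get?, hl, hf]
          exact ⟨rfl, rfl⟩
        rw [if_neg (by simp [hcontains.1]), if_pos hcontains.2]
        have hfold1 : ((c0 :: rest).foldl pvBStep ([], none)).1
            = (27:Int) :: pvCollect false (c0 :: rest) := by
          rw [List.foldl_cons]
          have hstep : pvBStep ([], none) c0 = ([27, w], some false) := by
            simp [pvBStep, ita2Map_fig hf]
          rw [hstep, pvBStep_run rest _ false hrest]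
          simp only [pvCollect, hl, hf]
          simp
        rw [hfold1]
        have hA := pvAStep_run (c0 :: rest)
          (PySem.Int.toBinChars 27 ++ [' ']) false hall
        rw [hA]
        have hflat : PySem.Int.toBinChars 27 ++ [' ']
              ++ ((pvCollect false (c0 :: rest)).map
                    (fun v => PySem.Int.toBinChars v ++ [' '])).flatten
            = (((27:Int) :: pvCollect false (c0 :: rest)).map
                    (fun v => PySem.Int.toBinChars v ++ [' '])).flatten := by
          simp
        rw [hflat, pvAPad_run]
        · simp
        · intro v hv
          rcases List.mem_cons.mp hv with hv | hv
          · subst hv; exact ⟨by decide, by decide⟩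
          · exact pvCollect_ok _ false v hv
    · -- first char is a letter: both sides start in letter shift
      have hcontains : ita2Ltr.contains c0 = true := by
        rw [PySem.Dict.contains_eq_isSome_get?, hl]; rfl
      rw [if_pos hcontains]
      have hfold1 : ((c0 :: rest).foldl pvBStep ([], none)).1
          = (31:Int) :: pvCollect true (c0 :: rest) := by
        rw [List.foldl_cons]
        have hstep : pvBStep ([], none) c0 = ([31, w], some true) := by
          simp [pvBStep, ita2Map_ltr hl]
        rw [hstep, pvBStep_run rest _ true hrest]
        simp only [pvCollect, hl]
        simp
      rw [hfold1]
      have hA := pvAStep_run (c0 :: rest)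
        (PySem.Int.toBinChars 31 ++ [' ']) true hall
      rw [hA]
      have hflat : PySem.Int.toBinChars 31 ++ [' ']
            ++ ((pvCollect true (c0 :: rest)).map
                  (fun v => PySem.Int.toBinChars v ++ [' '])).flatten
          = (((31:Int) :: pvCollect true (c0 :: rest)).map
                  (fun v => PySem.Int.toBinChars v ++ [' '])).flatten := by
        simp
      rw [hflat, pvAPad_run]
      · simp
      · intro v hv
        rcases List.mem_cons.mp hv with hv | hv
        · subst hv; exact ⟨by decide, by decide⟩
        · exact pvCollect_ok _ true v hv

theorem ITA2Encode_raises : Claim_raises_ITA2Encode := by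
  unfold Claim_raises_ITA2Encode
  constructor
  · intro text sp _ hr hpre; exact hpre.1 hr
  · exact ⟨by decide, by decide, by decide⟩

-- self-check: the crash-fix witness facts, read off ITA2Encode_raises
theorem pvRaiseWitness_ITA2Encode_ok :
    Raises_ITA2Encode pvRaiseWitness_ITA2Encode.1 pvRaiseWitness_ITA2Encode.2 ∧
      ITA2Encode_alt pvRaiseWitness_ITA2Encode.1 pvRaiseWitness_ITA2Encode.2
        = pvRaiseWitnessOut_ITA2Encode :=
  ITA2Encode_raises.2.2
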